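-- pv_equiv track=rewrite | github.com/ydb-platform/ydb | contrib/python/pg8000/pg8000/converters.py | record_in
-- ===== SOURCE A (Python) =====
-- from enum import Enum
--
-- class ParserState(Enum):
--     InString = 1
--     InEscape = 2
--     InValue = 3
--     Out = 4
--
-- def record_in(data):
--     state = ParserState.Out
--     results = []
--     val = []
--     for c in data:
--         if state == ParserState.InValue:
--             if c in (")", ","):
--                 value = "".join(val)
--                 val.clear()
--                 results.append(None if value == "" else value)
--                 state = ParserState.Out
--             else:
--                 val.append(c)
--
--         if state == ParserState.Out:
--             if c in "(),":
--                 pass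
--             elif c == '"':
--                 state = ParserState.InString
--             else:
--                 val.append(c)
--                 state = ParserState.InValue
--
--         elif state == ParserState.InString:
--             if c == '"':
--                 results.append("".join(val))
--                 val.clear()
--                 state = ParserState.Out
--             elif c == "\\":
--                 state = ParserState.InEscape
--             else:
--                 val.append(c)
--
--         elif state == ParserState.InEscape:
--             val.append(c)
--             state = ParserState.InString
--
--     return tuple(results)
-- ===== SOURCE B (Python) =====
-- def record_in(data):
--     results = []
--     n = len(data)
--     i = 0
--     while i < n:
--         c = data[i]
--         if c in '(),':
--             i += 1
--         elif c == '"':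
--             i += 1
--             buf = []
--             closed = False
--             while i < n:
--                 ch = data[i]
--                 if ch == '\\':
--                     if i + 1 < n:
--                         buf.append(data[i + 1])
--                         i += 2
--                     else:
--                         i = n
--                 elif ch == '"':
--                     closed = True
--                     i += 1
--                     break
--                 else:
--                     buf.append(ch)
--                     i += 1
--             if closed:
--                 results.append(''.join(buf))
--         else:
--             buf = []
--             while i < n and data[i] not in '),':
--                 buf.append(data[i])
--                 i += 1
--             if i < n:
--                 results.append(''.join(buf))
--     return tuple(results)
-- ===== Notes on version B (the rewrite author's own statement) =====
-- stated objective: faster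
-- what changed: Replaces the flat per-character enum state machine (Out/InString/InEscape/InValue with fall-through flushing) by an index-driven tokenizer: the top loop skips delimiters and dispatches to dedicated inner loops for quoted bodies and unquoted runs, appending a token only when its terminator is found.
import Mathlib
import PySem

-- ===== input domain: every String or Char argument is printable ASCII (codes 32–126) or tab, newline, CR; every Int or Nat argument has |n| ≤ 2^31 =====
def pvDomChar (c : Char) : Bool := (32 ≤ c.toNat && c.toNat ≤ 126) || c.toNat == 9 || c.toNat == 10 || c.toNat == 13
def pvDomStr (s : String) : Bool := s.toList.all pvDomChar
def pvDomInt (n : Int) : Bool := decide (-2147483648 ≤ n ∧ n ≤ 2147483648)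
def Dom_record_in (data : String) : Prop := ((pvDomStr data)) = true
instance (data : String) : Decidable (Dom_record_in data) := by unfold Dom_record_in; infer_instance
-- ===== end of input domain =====

-- B replaces A's flat per-character enum state machine by an index-driven tokenizer with
-- dedicated inner loops for quoted bodies and unquoted runs; same results on all inputs.

-- ===== PORT A =====
-- the four-valued parser state of A
inductive PState | InString | InEscape | InValue | Out
deriving DecidableEq, Repr

-- one iteration of A's for-loop body: first the (plain) `if state == InValue` block,
-- then the `if state == Out / elif InString / elif InEscape` chain on the SAME char
def recordStep (st : PState) (c : Char) (res : List (Option String)) (val : List Char) :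
    PState × List (Option String) × List Char :=
  let (st, res, val) :=
    if st = PState.InValue then
      if c = ')' ∨ c = ',' then
        let value := String.ofList val
        (PState.Out, res ++ [if value = "" then none else some value], ([] : List Char))
      else (st, res, val ++ [c])
    else (st, res, val)
  if st = PState.Out then
    if c = '(' ∨ c = ')' ∨ c = ',' then (st, res, val)
    else if c = '"' then (PState.InString, res, val)
    else (PState.InValue, res, val ++ [c])
  else if st = PState.InString then
    if c = '"' then (PState.Out, res ++ [some (String.ofList val)], [])
    else if c = '\\' then (PState.InEscape, res, val)
    else (st, res, val ++ [c])
  else if st = PState.InEscape then (PState.InString, res, val ++ [c])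
  else (st, res, val)

-- the for-loop over data; at the end `tuple(results)` is the accumulated list
def recordGo : List Char → PState → List (Option String) → List Char → List (Option String)
  | [], _, res, _ => res
  | c :: rest, st, res, val =>
    recordGo rest (recordStep st c res val).1 (recordStep st c res val).2.1 (recordStep st c res val).2.2

def record_in (data : String) : List (Option String) :=
  recordGo data.toList PState.Out [] []

-- ===== PORT B =====
-- inner loop of B for a quoted body: consumes up to and including the closing '"';
-- none = the quote (or a trailing escape) is unterminated, so the token is discarded
def quotedScan : List Char → List Char → Option (String × List Char)
  | [], _ => none
  | c :: rest, buf =>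
    if c = '\\' then
      match rest with
      | [] => none
      | d :: rest' => quotedScan rest' (buf ++ [d])
    else if c = '"' then some (String.ofList buf, rest)
    else quotedScan rest (buf ++ [c])

-- inner loop of B for an unquoted run: stops BEFORE the ')' or ',' terminator
def unquotScan : List Char → List Char → List Char × List Char
  | [], run => (run, [])
  | c :: rest, run =>
    if c = ')' ∨ c = ',' then (run, c :: rest) else unquotScan rest (run ++ [c])

-- needed by altGo's termination argument
theorem quotedScan_length : ∀ (n : ℕ) (cs buf : List Char) (s : String) (rest : List Char),
    cs.length ≤ n → quotedScan cs buf = some (s, rest) → rest.length < cs.length := by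
  intro n
  induction n with
  | zero =>
    intro cs buf s rest hlen h
    have : cs = [] := List.eq_nil_of_length_eq_zero (Nat.le_zero.mp hlen)
    subst this; rw [quotedScan.eq_def] at h; simp at h
  | succ n ih =>
    intro cs buf s rest hlen h
    cases cs with
    | nil => rw [quotedScan.eq_def] at h; simp at h
    | cons c tl =>
      rw [quotedScan.eq_def] at h
      by_cases hb : c = '\\'
      · cases tl with
        | nil => simp [hb] at h
        | cons d tl' =>
          simp only [hb, reduceIte] at h
          have := ih tl' (buf ++ [d]) s rest (by simp at hlen ⊢; omega) h
          simp at this ⊢; omega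
      · by_cases hq : c = '"'
        · simp [hq] at h
          simp [← h.2]
        · simp only [hb, hq, reduceIte] at h
          have := ih tl (buf ++ [c]) s rest (by simp at hlen; omega) h
          simp at this ⊢; omega

-- needed by altGo's termination argument
theorem unquotScan_length {cs run r rest : List Char}
    (h : unquotScan cs run = (r, rest)) : rest.length ≤ cs.length := by
  induction cs generalizing run with
  | nil => simp [unquotScan] at h; simp [h.2]
  | cons c tl ih =>
    by_cases hd : c = ')' ∨ c = ','
    · simp only [unquotScan, hd, reduceIte] at h
      cases h; simp
    · simp only [unquotScan, hd, reduceIte] at h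
      have := ih h; simp; omega

-- top loop of B: skip delimiters, dispatch to the matching inner scanner
def altGo : List Char → List (Option String) → List (Option String)
  | [], res => res
  | c :: rest, res =>
    if c = '(' ∨ c = ')' ∨ c = ',' then altGo rest res
    else if c = '"' then
      match h : quotedScan rest [] with
      | some (s, rest') => altGo rest' (res ++ [some s])
      | none => res
    else
      match h : unquotScan rest [c] with
      | (_, []) => res
      | (run, d :: rest') => altGo (d :: rest') (res ++ [some (String.ofList run)])
  termination_by cs _ => cs.length
  decreasing_by
  · simp
  · have := quotedScan_length rest.length rest [] _ _ le_rfl h; simp; omega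
  · have := unquotScan_length h; simp at this ⊢; omega

def record_in_alt (data : String) : List (Option String) :=
  altGo data.toList []

-- ===== PRECONDITION & SPEC =====
def Spec_record_in (data : String) (out : List (Option String)) : Prop := out = record_in_alt data
instance (data : String) (out : List (Option String)) : Decidable (Spec_record_in data out) := by unfold Spec_record_in; infer_instance

-- ===== CLAIM (what is proved, stated in full; the proofs are below) =====
def Claim_equal_record_in : Prop := ∀ (data : String), Dom_record_in data → Spec_record_in data (record_in data)

-- ===== LEMMAS AND PROOFS =====

-- case-by-case values of A's loop body
theorem step_out_delim (c : Char) (res : List (Option String)) (val : List Char)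
    (h : c = '(' ∨ c = ')' ∨ c = ',') : recordStep PState.Out c res val = (PState.Out, res, val) := by
  rcases h with h | h | h <;> subst h <;> simp [recordStep]
theorem step_out_quote (res : List (Option String)) (val : List Char) :
    recordStep PState.Out '"' res val = (PState.InString, res, val) := by simp [recordStep]
theorem step_out_other (c : Char) (res : List (Option String)) (val : List Char)
    (h1 : ¬(c = '(' ∨ c = ')' ∨ c = ',')) (h2 : ¬ c = '"') :
    recordStep PState.Out c res val = (PState.InValue, res, val ++ [c]) := by
  simp [recordStep, h1, h2]
theorem step_instring_quote (res : List (Option String)) (val : List Char) :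
    recordStep PState.InString '"' res val = (PState.Out, res ++ [some (String.ofList val)], []) := by
  simp [recordStep]
theorem step_instring_esc (res : List (Option String)) (val : List Char) :
    recordStep PState.InString '\\' res val = (PState.InEscape, res, val) := by simp [recordStep]
theorem step_instring_other (c : Char) (res : List (Option String)) (val : List Char)
    (hq : ¬ c = '"') (hb : ¬ c = '\\') :
    recordStep PState.InString c res val = (PState.InString, res, val ++ [c]) := by
  simp [recordStep, hq, hb]
theorem step_inescape (c : Char) (res : List (Option String)) (val : List Char) :
    recordStep PState.InEscape c res val = (PState.InString, res, val ++ [c]) := by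
  simp [recordStep]
theorem step_invalue_delim (c : Char) (res : List (Option String)) (val : List Char)
    (h : c = ')' ∨ c = ',') (hval : val ≠ []) :
    recordStep PState.InValue c res val = (PState.Out, res ++ [some (String.ofList val)], []) := by
  rcases h with h | h <;> subst h <;> simp [recordStep, hval]
theorem step_invalue_other (c : Char) (res : List (Option String)) (val : List Char)
    (h : ¬(c = ')' ∨ c = ',')) :
    recordStep PState.InValue c res val = (PState.InValue, res, val ++ [c]) := by
  simp [recordStep, h]

-- one-step unfoldings of B's scanners and top loop
theorem q_nil (buf : List Char) : quotedScan [] buf = none := by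
  rw [quotedScan.eq_def]
theorem q_esc_nil (buf : List Char) : quotedScan ['\\'] buf = none := by
  rw [quotedScan.eq_def]; simp
theorem q_esc (d : Char) (rest buf : List Char) :
    quotedScan ('\\' :: d :: rest) buf = quotedScan rest (buf ++ [d]) := by
  rw [quotedScan.eq_def]; simp
theorem q_quote (rest buf : List Char) :
    quotedScan ('"' :: rest) buf = some (String.ofList buf, rest) := by
  rw [quotedScan.eq_def]; simp
theorem q_other (c : Char) (rest buf : List Char) (hb : ¬ c = '\\') (hq : ¬ c = '"') :
    quotedScan (c :: rest) buf = quotedScan rest (buf ++ [c]) := by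
  rw [quotedScan.eq_def]; simp [hb, hq]
theorem u_delim (c : Char) (rest run : List Char) (h : c = ')' ∨ c = ',') :
    unquotScan (c :: rest) run = (run, c :: rest) := by
  simp [unquotScan, h]
theorem u_other (c : Char) (rest run : List Char) (h : ¬(c = ')' ∨ c = ',')) :
    unquotScan (c :: rest) run = unquotScan rest (run ++ [c]) := by
  simp [unquotScan, h]

-- what B computes after A has entered the InString state with accumulator `val`
def qspec (cs val : List Char) (res : List (Option String)) : List (Option String) :=
  match quotedScan cs val with
  | some (s, rest) => altGo rest (res ++ [some s])
  | none => res

-- what B computes after A has entered the InValue state with accumulator `val`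
def uspec (cs val : List Char) (res : List (Option String)) : List (Option String) :=
  match unquotScan cs val with
  | (_, []) => res
  | (run, d :: rest') => altGo (d :: rest') (res ++ [some (String.ofList run)])

theorem alt_nil (res : List (Option String)) : altGo [] res = res := by
  rw [altGo.eq_def]
theorem alt_delim (c : Char) (rest : List Char) (res : List (Option String))
    (h : c = '(' ∨ c = ')' ∨ c = ',') : altGo (c :: rest) res = altGo rest res := by
  rw [altGo.eq_def]; simp [h]
theorem alt_quote (rest : List Char) (res : List (Option String)) :
    altGo ('"' :: rest) res = qspec rest [] res := by
  rw [altGo.eq_def]; simp only [reduceIte, Char.reduceEq, or_self]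
  unfold qspec; split <;> simp_all
theorem alt_other (c : Char) (rest : List Char) (res : List (Option String))
    (h1 : ¬(c = '(' ∨ c = ')' ∨ c = ',')) (h2 : ¬ c = '"') :
    altGo (c :: rest) res = uspec rest [c] res := by
  rw [altGo.eq_def]; simp only [h1, h2, reduceIte]
  unfold uspec; split <;> simp_all

theorem main_lemma : ∀ n : ℕ, ∀ cs : List Char, cs.length ≤ n →
    (∀ res, recordGo cs PState.Out res [] = altGo cs res) ∧
    (∀ res val, recordGo cs PState.InString res val = qspec cs val res) ∧
    (∀ res val, val ≠ [] → recordGo cs PState.InValue res val = uspec cs val res) := by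
  intro n
  induction n with
  | zero =>
    intro cs hlen
    have hnil : cs = [] := List.eq_nil_of_length_eq_zero (Nat.le_zero.mp hlen)
    subst hnil
    refine ⟨fun res => by simp [recordGo, alt_nil], fun res val => ?_, fun res val _ => ?_⟩
    · simp [recordGo, qspec, q_nil]
    · simp [recordGo, uspec, unquotScan]
  | succ n ih =>
    intro cs hlen
    cases cs with
    | nil =>
      refine ⟨fun res => by simp [recordGo, alt_nil], fun res val => ?_, fun res val _ => ?_⟩
      · simp [recordGo, qspec, q_nil]
      · simp [recordGo, uspec, unquotScan]
    | cons c rest =>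
      have hrest : rest.length ≤ n := by simp at hlen; omega
      refine ⟨?_, ?_, ?_⟩
      · -- A in state Out (val = []) ~ B's top loop
        intro res
        by_cases hd : c = '(' ∨ c = ')' ∨ c = ','
        · simp only [recordGo, step_out_delim c res [] hd]
          rw [(ih rest hrest).1, alt_delim c rest res hd]
        · by_cases hq : c = '"'
          · subst hq
            simp only [recordGo, step_out_quote]
            rw [(ih rest hrest).2.1, alt_quote]
          · simp only [recordGo, step_out_other c res [] hd hq]
            simp only [List.nil_append]
            rw [(ih rest hrest).2.2 res [c] (by simp), alt_other c rest res hd hq]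
      · -- A in state InString ~ B's quoted-body scanner
        intro res val
        by_cases hb : c = '\\'
        · subst hb
          simp only [recordGo, step_instring_esc]
          cases rest with
          | nil =>
            simp [recordGo, qspec, q_esc_nil]
          | cons d rest' =>
            have hrest' : rest'.length ≤ n := by simp at hlen; omega
            simp only [recordGo, step_inescape]
            rw [(ih rest' hrest').2.1]
            simp [qspec, q_esc]
        · by_cases hq : c = '"'
          · subst hq
            simp only [recordGo, step_instring_quote]
            rw [(ih rest hrest).1]
            simp [qspec, q_quote]
          · simp only [recordGo, step_instring_other c res val hq hb]
            rw [(ih rest hrest).2.1]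
            simp [qspec, q_other c rest val hb hq]
      · -- A in state InValue (val ≠ []) ~ B's unquoted-run scanner
        intro res val hval
        by_cases hd : c = ')' ∨ c = ','
        · have hd3 : c = '(' ∨ c = ')' ∨ c = ',' := Or.inr hd
          simp only [recordGo, step_invalue_delim c res val hd hval]
          rw [(ih rest hrest).1]
          simp [uspec, u_delim c rest val hd, alt_delim c rest _ hd3]
        · simp only [recordGo, step_invalue_other c res val hd]
          rw [(ih rest hrest).2.2 res (val ++ [c]) (by simp)]
          simp [uspec, u_other c rest val hd]

-- ===== VERDICT (by name: the statement is the Claim_ definition above) =====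
theorem record_in_spec : Claim_equal_record_in := by
  intro data _
  unfold Spec_record_in record_in record_in_alt
  exact (main_lemma data.toList.length data.toList le_rfl).1 []
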